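-- pv_equiv track=rewrite | github.com/bryanhann/bch-zjot | bch_zjot/cmd_new.py | line4args
-- ===== SOURCE A (Python) =====
-- def line4args(args):
--         SPACE=' '
--         def is_tag(x): return x.startswith('{') and x.endswith('}')
--         args = [ '{zjot}' ] + args + ['']
--         tags = []
--         while is_tag(args[0]):
--             tags.append(args.pop(0))
--         return "%s | %s" % (SPACE.join(tags), SPACE.join(args))
-- ===== SOURCE B (Python) =====
-- def line4args(args):
--     SPACE = ' '
--     def is_tag(x): return x.startswith('{') and x.endswith('}')
--     xs = ['{zjot}'] + args + ['']
--     i = next(j for j, x in enumerate(xs) if not is_tag(x))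
--     return "%s | %s" % (SPACE.join(xs[:i]), SPACE.join(xs[i:]))
-- ===== Notes on version B (the rewrite author's own statement) =====
-- stated objective: simpler
-- what changed: Replaces the mutating while/pop(0) loop with a single scan that finds the first non-tag index, then slices the augmented list into tags and rest (no mutation).
import Mathlib
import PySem

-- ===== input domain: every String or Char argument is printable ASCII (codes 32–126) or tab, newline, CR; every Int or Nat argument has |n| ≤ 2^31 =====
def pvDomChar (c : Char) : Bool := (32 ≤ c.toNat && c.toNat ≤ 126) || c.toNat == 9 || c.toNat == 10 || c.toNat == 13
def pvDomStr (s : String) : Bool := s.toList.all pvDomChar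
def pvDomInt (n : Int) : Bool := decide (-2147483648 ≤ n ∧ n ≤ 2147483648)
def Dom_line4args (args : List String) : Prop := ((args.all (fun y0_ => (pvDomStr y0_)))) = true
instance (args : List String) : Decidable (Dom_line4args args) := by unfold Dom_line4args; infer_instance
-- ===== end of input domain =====

-- B replaces A's mutating while/pop(0) loop by computing the first non-tag index and slicing; simpler, no mutation.

-- ===== PORT A =====
def pvIsTag (x : String) : Bool :=
  PySem.Str.startswith x "{" && PySem.Str.endswith x "}"

-- A's while loop: pop tags off the front while the head is a tag (the '' sentinel
-- guarantees the head exists; the [] case is unreachable and returns the state as-is)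
def pvLoopA : List String → List String → (List String × List String)
  | tags, [] => (tags, [])
  | tags, x :: xs =>
    if pvIsTag x then pvLoopA (tags ++ [x]) xs else (tags, x :: xs)

def line4args (args : List String) : String :=
  let args1 := ["{zjot}"] ++ args ++ [""]
  let (tags, rest) := pvLoopA [] args1
  PySem.Str.join " " tags ++ " | " ++ PySem.Str.join " " rest

-- ===== PORT B =====
def line4args_alt (args : List String) : String :=
  let xs := ["{zjot}"] ++ args ++ [""]
  let i := xs.findIdx (fun x => !pvIsTag x)
  PySem.Str.join " " (xs.take i) ++ " | " ++ PySem.Str.join " " (xs.drop i)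

-- ===== PRECONDITION & SPEC =====
def Spec_line4args (args : List String) (out : String) : Prop := out = line4args_alt args
instance (args : List String) (out : String) : Decidable (Spec_line4args args out) := by unfold Spec_line4args; infer_instance

-- ===== CLAIM (what is proved, stated in full; the proofs are below) =====
def Claim_equal_line4args : Prop := ∀ (args : List String), Dom_line4args args → Spec_line4args args (line4args args)

-- ===== LEMMAS AND PROOFS =====

theorem pvLoopA_eq (acc xs : List String) :
    pvLoopA acc xs = (acc ++ xs.takeWhile pvIsTag, xs.dropWhile pvIsTag) := by
  induction xs generalizing acc with
  | nil => simp [pvLoopA]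
  | cons x xs ih =>
    by_cases h : pvIsTag x = true
    · simp [pvLoopA, h, ih]
    · simp [pvLoopA, h]

theorem take_findIdx_eq_takeWhile (xs : List String) :
    xs.take (xs.findIdx (fun x => !pvIsTag x)) = xs.takeWhile pvIsTag := by
  induction xs with
  | nil => simp
  | cons x xs ih =>
    by_cases h : pvIsTag x = true
    · simp [List.findIdx_cons, h, ih]
    · simp [List.findIdx_cons, h]

theorem drop_findIdx_eq_dropWhile (xs : List String) :
    xs.drop (xs.findIdx (fun x => !pvIsTag x)) = xs.dropWhile pvIsTag := by
  induction xs with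
  | nil => simp
  | cons x xs ih =>
    by_cases h : pvIsTag x = true
    · simp [List.findIdx_cons, h, ih]
    · simp [List.findIdx_cons, h]

-- ===== VERDICT (by name: the statement is the Claim_ definition above) =====
theorem line4args_spec : Claim_equal_line4args := by
  intro args _
  unfold Spec_line4args line4args line4args_alt
  simp only [pvLoopA_eq, List.nil_append, take_findIdx_eq_takeWhile, drop_findIdx_eq_dropWhile]
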